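-- pv_equiv track=rewrite | github.com/miliar/Code_Jam_Webscraper | solutions_python/Problem_206/1507.py | pancakeflip
-- ===== SOURCE A (Python) =====
-- def pancakeflip(s,k):
--     pancakenumber=len(s)
--     pancakearray=[]
--     flips=pancakenumber-k+1
--     for i in range(flips):
--         sflip=list(s)
--         for j in range(k):
--             if sflip[i+j]==0:
--                 sflip[i+j]=1
--             elif sflip[i+j]==1:
--                 sflip[i+j]=0
--         if sflip not in pancakearray:
--             pancakearray.append(list(sflip))
--     return pancakearray
-- ===== SOURCE B (Python) =====
-- def _tog(x):
--     # conditional toggle: only 0 and 1 flip, anything else is untouched (self-inverse)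
--     return 1 - x if x in (0, 1) else x
--
-- def pancakeflip(s, k):
--     n = len(s)
--     flips = n - k + 1
--     if flips <= 0:
--         return []
--     if k <= 0:
--         # every window is empty, so every candidate equals s; dedup keeps one copy
--         return [list(s)]
--     # first window: toggle positions 0..k-1 once
--     cur = [_tog(x) for x in s[:k]] + list(s[k:])
--     res = [list(cur)]
--     # slide the window: undo position i-1, apply position i+k-1 (O(1) per window)
--     for i in range(1, flips):
--         cur[i - 1] = _tog(cur[i - 1])
--         cur[i + k - 1] = _tog(cur[i + k - 1])
--         if cur not in res:
--             res.append(list(cur))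
--     return res
-- ===== Notes on version B (the rewrite author's own statement) =====
-- stated objective: faster
-- what changed: Instead of copying s and re-flipping all k window positions for every window, B builds the first window's array once and then slides a single running array across the remaining windows with two O(1) conditional toggles per step (undo position i-1, apply position i+k-1), keeping the same list-based dedup and append order.
import Mathlib
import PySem

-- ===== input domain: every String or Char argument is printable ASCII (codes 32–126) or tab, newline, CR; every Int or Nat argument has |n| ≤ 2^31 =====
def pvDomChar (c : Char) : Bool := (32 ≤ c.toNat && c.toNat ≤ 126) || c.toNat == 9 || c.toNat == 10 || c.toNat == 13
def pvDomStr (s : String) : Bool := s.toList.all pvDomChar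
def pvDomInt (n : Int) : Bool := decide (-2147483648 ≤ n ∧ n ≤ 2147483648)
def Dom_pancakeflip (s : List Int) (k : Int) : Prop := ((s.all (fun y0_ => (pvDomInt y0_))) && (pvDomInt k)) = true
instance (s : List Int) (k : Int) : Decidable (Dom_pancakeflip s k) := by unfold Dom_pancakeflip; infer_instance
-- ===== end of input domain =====

-- B maintains one running window with two conditional toggles per step instead of re-flipping k positions per window; same dedup discipline, same return value.

-- ===== PORT A =====
-- the conditional flip A performs at sflip[idx]; in A the index is always in range,
-- so the none branch (Python's IndexError) is unreachable.
def pvTogA (l : List Int) (idx : Int) : List Int :=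
  match PySem.List.pyGet? l idx with
  | some v =>
      if v = 0 then PySem.List.pySetD l idx 1
      else if v = 1 then PySem.List.pySetD l idx 0
      else l
  | none => l

def pancakeflip (s : List Int) (k : Int) : List (List Int) :=
  let pancakenumber : Int := s.length
  let flips : Int := pancakenumber - k + 1
  (PySem.List.pyRange 0 flips 1).foldl
    (fun pancakearray i =>
      let sflip := (PySem.List.pyRange 0 k 1).foldl (fun sf j => pvTogA sf (i + j)) s
      if pancakearray.contains sflip then pancakearray else pancakearray ++ [sflip])
    []

-- ===== PORT B =====
def pvTogB (x : Int) : Int := if x = 0 ∨ x = 1 then 1 - x else x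

-- s[:k] / s[k:] in the k > 0 branch are take/drop (exact there: k is nonnegative);
-- cur[i-1] / cur[i+k-1] reads are pyGetD with default 0 (the index is always in range in B's loop).
def pancakeflip_alt (s : List Int) (k : Int) : List (List Int) :=
  let n : Int := s.length
  let flips : Int := n - k + 1
  if flips ≤ 0 then []
  else if k ≤ 0 then [s]
  else
    let cur0 := (s.take k.toNat).map pvTogB ++ s.drop k.toNat
    ((PySem.List.pyRange 1 flips 1).foldl
      (fun (st : List Int × List (List Int)) i =>
        let c1 := PySem.List.pySetD st.1 (i - 1) (pvTogB (PySem.List.pyGetD st.1 (i - 1) 0))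
        let c2 := PySem.List.pySetD c1 (i + k - 1) (pvTogB (PySem.List.pyGetD c1 (i + k - 1) 0))
        (c2, if st.2.contains c2 then st.2 else st.2 ++ [c2]))
      (cur0, [cur0])).2

-- ===== PRECONDITION & SPEC =====
def Spec_pancakeflip (s : List Int) (k : Int) (out : List (List Int)) : Prop := out = pancakeflip_alt s k
instance (s : List Int) (k : Int) (out : List (List Int)) : Decidable (Spec_pancakeflip s k out) := by unfold Spec_pancakeflip; infer_instance

-- ===== CLAIM (what is proved, stated in full; the proofs are below) =====
def Claim_equal_pancakeflip : Prop := ∀ (s : List Int) (k : Int), Dom_pancakeflip s k → Spec_pancakeflip s k (pancakeflip s k)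

-- ===== LEMMAS AND PROOFS =====

-- the window-flipped array: positions [i, i+k) conditionally toggled
def pvWin (s : List Int) (i k : Nat) : List Int :=
  s.mapIdx (fun p x => if i ≤ p ∧ p < i + k then pvTogB x else x)

theorem pvTogB_invol (x : Int) : pvTogB (pvTogB x) = x := by
  unfold pvTogB; split_ifs <;> omega
theorem pvWin_length (s : List Int) (i k : Nat) : (pvWin s i k).length = s.length := by simp [pvWin]
theorem pvWin_getElem? (s : List Int) (i k p : Nat) :
    (pvWin s i k)[p]? = s[p]?.map (fun x => if i ≤ p ∧ p < i + k then pvTogB x else x) := by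
  simp [pvWin, List.getElem?_mapIdx]

theorem pvWin_zero (s : List Int) (m : Nat) : pvWin s m 0 = s := by
  apply List.ext_getElem?
  intro p
  rw [pvWin_getElem?]
  cases s[p]? with
  | none => rfl
  | some x => simp only [Option.map_some]; rw [if_neg (by omega)]

theorem pvTogA_eq (l : List Int) (p : Nat) :
    pvTogA l (p : Int) = if p < l.length then l.set p (pvTogB (l.getD p 0)) else l := by
  unfold pvTogA
  rw [PySem.List.pyGet?_natCast]
  by_cases hp : p < l.length
  · rw [List.getElem?_eq_getElem hp, if_pos hp]
    have hd : l.getD p 0 = l[p] := by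
      rw [List.getD_eq_getElem?_getD, List.getElem?_eq_getElem hp]; rfl
    rw [hd]
    dsimp only
    by_cases h0 : l[p] = 0
    · rw [if_pos h0, PySem.List.pySetD_natCast]; congr 1; simp [pvTogB, h0]
    · by_cases h1 : l[p] = 1
      · rw [if_neg h0, if_pos h1, PySem.List.pySetD_natCast]; congr 1; simp [pvTogB, h1]
      · rw [if_neg h0, if_neg h1]
        have ht : pvTogB l[p] = l[p] := by simp [pvTogB, h0, h1]
        rw [ht, List.set_getElem_self]
  · rw [List.getElem?_eq_none (by omega), if_neg hp]

theorem pvTogA_win (s : List Int) (m kn : Nat) :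
    pvTogA (pvWin s m kn) ((m + kn : Nat) : Int) = pvWin s m (kn + 1) := by
  rw [pvTogA_eq]
  by_cases h : m + kn < s.length
  · rw [if_pos (by rw [pvWin_length]; exact h)]
    have hd : (pvWin s m kn).getD (m + kn) 0 = s[m + kn] := by
      rw [List.getD_eq_getElem?_getD, pvWin_getElem?, List.getElem?_eq_getElem h]
      simp only [Option.map_some]; rw [if_neg (by omega)]; rfl
    rw [hd]
    apply List.ext_getElem?
    intro p
    rw [List.getElem?_set, pvWin_getElem?, pvWin_getElem?]
    by_cases hpe : m + kn = p
    · subst hpe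
      rw [if_pos rfl, if_pos (by rw [pvWin_length]; omega), List.getElem?_eq_getElem h]
      simp only [Option.map_some]
      rw [if_pos (by omega)]
    · rw [if_neg hpe]
      cases hsp : s[p]? with
      | none => rfl
      | some x =>
        simp only [Option.map_some]
        by_cases hc : m ≤ p ∧ p < m + kn
        · rw [if_pos hc, if_pos (by omega)]
        · rw [if_neg hc, if_neg (by omega)]
  · rw [if_neg (by rw [pvWin_length]; omega)]
    apply List.ext_getElem?
    intro p
    rw [pvWin_getElem?, pvWin_getElem?]
    by_cases hp : p < s.length
    · rw [List.getElem?_eq_getElem hp]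
      simp only [Option.map_some]
      by_cases hc : m ≤ p ∧ p < m + kn
      · rw [if_pos hc, if_pos (by omega)]
      · rw [if_neg hc, if_neg (by omega)]
    · rw [List.getElem?_eq_none (by omega)]; rfl

theorem pv_slide (s : List Int) (m kn : Nat) (hkn : 1 ≤ kn) (h : m + kn < s.length) :
    ((pvWin s m kn).set m (pvTogB ((pvWin s m kn).getD m 0))).set (m + kn)
        (pvTogB ((((pvWin s m kn).set m (pvTogB ((pvWin s m kn).getD m 0)))).getD (m + kn) 0))
      = pvWin s (m + 1) kn := by
  have hm : m < s.length := by omega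
  have hd1 : (pvWin s m kn).getD m 0 = pvTogB s[m] := by
    rw [List.getD_eq_getElem?_getD, pvWin_getElem?, List.getElem?_eq_getElem hm]
    simp only [Option.map_some]; rw [if_pos (by omega)]; rfl
  have hd2 : (((pvWin s m kn).set m (pvTogB ((pvWin s m kn).getD m 0)))).getD (m + kn) 0
      = s[m + kn] := by
    rw [List.getD_eq_getElem?_getD, List.getElem?_set, if_neg (by omega),
        pvWin_getElem?, List.getElem?_eq_getElem h]
    simp only [Option.map_some]; rw [if_neg (by omega)]; rfl
  rw [hd2, hd1, pvTogB_invol]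
  apply List.ext_getElem?
  intro p
  rw [List.getElem?_set, List.getElem?_set, pvWin_getElem?, pvWin_getElem?]
  by_cases h1 : m + kn = p
  · subst h1
    rw [if_pos rfl, if_pos (by simp [pvWin_length]; omega), List.getElem?_eq_getElem h]
    simp only [Option.map_some]
    rw [if_pos (by omega)]
  · rw [if_neg h1]
    by_cases h2 : m = p
    · subst h2
      rw [if_pos rfl, if_pos (by rw [pvWin_length]; omega), List.getElem?_eq_getElem hm]
      simp only [Option.map_some]
      rw [if_neg (by omega)]
    · rw [if_neg h2]
      by_cases hp : p < s.length
      · rw [List.getElem?_eq_getElem hp]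
        simp only [Option.map_some]
        by_cases hc : m ≤ p ∧ p < m + kn
        · rw [if_pos hc, if_pos (by omega)]
        · rw [if_neg hc, if_neg (by omega)]
      · rw [List.getElem?_eq_none (by omega)]; rfl

theorem pv_inner_eq (s : List Int) (m kn : Nat) :
    (PySem.List.pyRange 0 (kn : Int) 1).foldl (fun sf j => pvTogA sf ((m : Int) + j)) s
      = pvWin s m kn := by
  induction kn with
  | zero => rw [PySem.List.pyRange_one_eq_nil (by omega), pvWin_zero]; rfl
  | succ kn ih =>
    have hc : ((kn + 1 : Nat) : Int) = (kn : Int) + 1 := by push_cast; ring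
    rw [hc, PySem.List.pyRange_one_succ_right (by omega), List.foldl_append, ih]
    simp only [List.foldl_cons, List.foldl_nil]
    have hc2 : (m : Int) + (kn : Int) = ((m + kn : Nat) : Int) := by push_cast; ring
    rw [hc2, pvTogA_win]

theorem pv_cur0 (s : List Int) (kn : Nat) :
    (s.take kn).map pvTogB ++ s.drop kn = pvWin s 0 kn := by
  apply List.ext_getElem?
  intro p
  rw [pvWin_getElem?, List.getElem?_append]
  simp only [List.length_map, List.length_take, List.getElem?_map, List.getElem?_take,
    List.getElem?_drop]
  by_cases hp : p < kn ∧ p < s.length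
  · rw [if_pos (by omega), if_pos (by omega), List.getElem?_eq_getElem hp.2]
    simp only [Option.map_some]
    rw [if_pos (by omega)]
  · by_cases hps : p < s.length
    · have he : kn + (p - min kn s.length) = p := by omega
      rw [if_neg (by omega), he, List.getElem?_eq_getElem hps]
      simp only [Option.map_some]
      rw [if_neg (by omega)]
    · rw [List.getElem?_eq_none (l := s) (i := p) (by omega), Option.map_none]
      rw [if_neg (by omega), List.getElem?_eq_none (by omega)]

theorem pv_fold_keep {α : Type} (L : List α) (x : List Int) (A : List (List Int))
    (hx : A.contains x = true) :
    L.foldl (fun acc (_ : α) => if acc.contains x then acc else acc ++ [x]) A = A := by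
  induction L with
  | nil => rfl
  | cons y t ih => simp only [List.foldl_cons, hx, if_pos]; exact ih

theorem pv_main (s : List Int) (kn F : Nat) (hkn : 1 ≤ kn) (hF : kn + F = s.length + 1) :
    ∀ m : Nat, 1 ≤ m → m ≤ F →
    (PySem.List.pyRange 1 (m : Int) 1).foldl
      (fun (st : List Int × List (List Int)) i =>
        let c1 := PySem.List.pySetD st.1 (i - 1) (pvTogB (PySem.List.pyGetD st.1 (i - 1) 0))
        let c2 := PySem.List.pySetD c1 (i + (kn : Int) - 1) (pvTogB (PySem.List.pyGetD c1 (i + (kn : Int) - 1) 0))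
        (c2, if st.2.contains c2 then st.2 else st.2 ++ [c2]))
      (pvWin s 0 kn, [pvWin s 0 kn])
    = (pvWin s (m - 1) kn,
       (PySem.List.pyRange 0 (m : Int) 1).foldl
         (fun acc i =>
           let sflip := (PySem.List.pyRange 0 ((kn : Nat) : Int) 1).foldl (fun sf j => pvTogA sf (i + j)) s
           if acc.contains sflip then acc else acc ++ [sflip]) []) := by
  intro m
  induction m with
  | zero => omega
  | succ m ih =>
    intro _ hmF
    by_cases hm : m = 0
    · subst hm
      rw [PySem.List.pyRange_one_eq_nil (by omega)]
      have h01 : ((0 + 1 : Nat) : Int) = 0 + 1 := by norm_num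
      rw [h01, PySem.List.pyRange_one_succ_right (by omega), PySem.List.pyRange_one_eq_nil (le_refl 0)]
      simp only [List.foldl_nil, List.nil_append, List.foldl_cons]
      have hi : (PySem.List.pyRange 0 ((kn : Nat) : Int) 1).foldl (fun sf j => pvTogA sf ((0 : Int) + j)) s
          = pvWin s 0 kn := by
        have h := pv_inner_eq s 0 kn
        simpa using h
      rw [hi]
      simp
    · have hm1 : 1 ≤ m := by omega
      have hc : ((m + 1 : Nat) : Int) = (m : Int) + 1 := by push_cast; ring
      rw [hc, PySem.List.pyRange_one_succ_right (a := 1) (by omega),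
          PySem.List.pyRange_one_succ_right (a := 0) (by omega),
          List.foldl_append, List.foldl_append, ih hm1 (by omega)]
      simp only [List.foldl_cons, List.foldl_nil]
      have e1 : (m : Int) - 1 = ((m - 1 : Nat) : Int) := by omega
      have e2 : (m : Int) + (kn : Int) - 1 = (((m - 1) + kn : Nat) : Int) := by omega
      have hlen : (m - 1) + kn < s.length := by omega
      have hstep :
          PySem.List.pySetD
              (PySem.List.pySetD (pvWin s (m - 1) kn) ((m : Int) - 1)
                (pvTogB (PySem.List.pyGetD (pvWin s (m - 1) kn) ((m : Int) - 1) 0)))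
              ((m : Int) + (kn : Int) - 1)
              (pvTogB (PySem.List.pyGetD
                (PySem.List.pySetD (pvWin s (m - 1) kn) ((m : Int) - 1)
                  (pvTogB (PySem.List.pyGetD (pvWin s (m - 1) kn) ((m : Int) - 1) 0)))
                ((m : Int) + (kn : Int) - 1) 0))
            = pvWin s m kn := by
        rw [e1, e2]
        rw [PySem.List.pySetD_natCast, PySem.List.pySetD_natCast,
            PySem.List.pyGetD_natCast, PySem.List.pyGetD_natCast]
        have hs := pv_slide s (m - 1) kn hkn hlen
        have hmm : (m - 1) + 1 = m := by omega
        rw [hmm] at hs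
        simpa using hs
      have hinner : (PySem.List.pyRange 0 ((kn : Nat) : Int) 1).foldl
          (fun sf j => pvTogA sf ((m : Int) + j)) s = pvWin s m kn := pv_inner_eq s m kn
      simp only [hstep, hinner]
      have hmm1 : m + 1 - 1 = m := by omega
      rw [hmm1]
theorem pancakeflip_spec' : ∀ (s : List Int) (k : Int), pancakeflip s k = pancakeflip_alt s k := by
  intro s k
  by_cases hf : (s.length : Int) - k + 1 ≤ 0
  · simp only [pancakeflip, pancakeflip_alt]
    rw [PySem.List.pyRange_one_eq_nil (a := 0) (b := (s.length : Int) - k + 1) (by omega)]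
    rw [if_pos hf]
    rfl
  · by_cases hk : k ≤ 0
    · simp only [pancakeflip, pancakeflip_alt]
      rw [if_neg hf, if_pos hk]
      rw [PySem.List.pyRange_one_eq_nil (a := 0) (b := k) (by omega)]
      rw [PySem.List.pyRange_one_cons (a := 0) (b := (s.length : Int) - k + 1) (by omega)]
      simp only [List.foldl_cons, List.foldl_nil, List.contains_nil, Bool.false_eq_true,
        if_false, List.nil_append]
      apply pv_fold_keep
      simp
    · simp only [pancakeflip, pancakeflip_alt]
      rw [if_neg hf, if_neg hk]
      have hkc : ((k.toNat : Nat) : Int) = k := Int.toNat_of_nonneg (by omega)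
      have hFc : (((((s.length : Int) - k + 1).toNat) : Nat) : Int) = (s.length : Int) - k + 1 :=
        Int.toNat_of_nonneg (by omega)
      set kn := k.toNat with hknd
      set F := ((s.length : Int) - k + 1).toNat with hFd
      have hF1 : 1 ≤ F := by omega
      have hsum : kn + F = s.length + 1 := by omega
      have hmain := pv_main s kn F (by omega) hsum F hF1 (le_refl F)
      simp only [pv_cur0 s kn]
      rw [← hFc, ← hkc, hmain]

-- ===== VERDICT (by name: the statement is the Claim_ definition above) =====
theorem pancakeflip_spec : Claim_equal_pancakeflip := by
  intro s k _
  unfold Spec_pancakeflip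
  exact pancakeflip_spec' s k
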